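-- pv_equiv track=rewrite | github.com/JuanRRaFdez/VtesProxi | apps/srv_textos/views.py | _compute_vertical_stack_positions
-- ===== SOURCE A (Python) =====
-- def _compute_vertical_stack_positions(box, item_size, spacing, item_count, source='legacy'):
--     count = max(0, int(item_count or 0))
--     if count == 0:
--         return []
--
--     item_size = max(1, int(item_size))
--     spacing = max(1, int(spacing))
--
--     positions = []
--     if source == 'box':
--         current_bottom = int(box.get('y', 0))
--         for _ in range(count):
--             current_y = current_bottom - item_size
--             if current_y < 0:
--                 break
--             positions.append(current_y)
--             current_bottom -= spacing
--         return positions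
--
--     top = int(box.get('y', 0))
--     bottom = top + max(1, int(box.get('height', item_size)))
--     current_y = bottom - item_size
--     for _ in range(count):
--         if current_y < top:
--             break
--         positions.append(current_y)
--         current_y -= spacing
--     return positions
-- ===== SOURCE B (Python) =====
-- def _compute_vertical_stack_positions(box, item_size, spacing, item_count, source='legacy'):
--     count = max(0, int(item_count or 0))
--     item_size = max(1, int(item_size))
--     spacing = max(1, int(spacing))
--     if source == 'box':
--         start = int(box.get('y', 0)) - item_size
--         bound = 0
--     else:
--         top = int(box.get('y', 0))
--         start = top + max(1, int(box.get('height', item_size))) - item_size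
--         bound = top
--     n = min(count, (start - bound) // spacing + 1) if start >= bound else 0
--     return [start - i * spacing for i in range(n)]
-- ===== Notes on version B (the rewrite author's own statement) =====
-- stated objective: alternative
-- what changed: Replaces A's incremental bound-check-and-break loops (one per source branch) by computing the number of valid positions in closed form with one floor division and emitting the arithmetic sequence directly as a comprehension.
import Mathlib
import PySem

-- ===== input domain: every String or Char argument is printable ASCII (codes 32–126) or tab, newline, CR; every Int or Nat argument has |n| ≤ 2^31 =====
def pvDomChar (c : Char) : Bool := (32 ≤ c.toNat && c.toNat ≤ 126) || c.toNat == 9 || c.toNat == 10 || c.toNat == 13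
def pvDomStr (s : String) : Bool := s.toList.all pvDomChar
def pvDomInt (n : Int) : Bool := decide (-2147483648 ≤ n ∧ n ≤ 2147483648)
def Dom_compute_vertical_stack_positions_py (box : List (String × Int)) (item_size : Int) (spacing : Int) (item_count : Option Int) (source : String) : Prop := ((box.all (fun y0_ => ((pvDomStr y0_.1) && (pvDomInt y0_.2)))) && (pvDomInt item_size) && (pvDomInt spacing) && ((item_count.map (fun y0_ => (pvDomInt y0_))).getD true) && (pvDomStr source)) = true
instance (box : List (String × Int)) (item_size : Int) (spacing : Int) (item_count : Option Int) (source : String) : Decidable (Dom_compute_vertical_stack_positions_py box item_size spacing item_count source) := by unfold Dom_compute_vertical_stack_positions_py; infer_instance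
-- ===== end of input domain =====

-- B replaces A's bound-check-and-break loops by an analytic count of the valid
-- positions followed by a direct arithmetic-sequence comprehension (objective:
-- alternative decomposition, same asymptotic cost).

-- ===== PORT A =====
-- the 'box' branch loop: state is current_bottom; recomputes current_y each turn
def pvLoopBoxA (item_size spacing : Int) : Nat → Int → List Int
  | 0, _ => []
  | Nat.succ k, current_bottom =>
    let current_y := current_bottom - item_size
    if current_y < 0 then []
    else current_y :: pvLoopBoxA item_size spacing k (current_bottom - spacing)

-- the 'legacy' branch loop: state is current_y itself
def pvLoopLegacyA (spacing top : Int) : Nat → Int → List Int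
  | 0, _ => []
  | Nat.succ k, current_y =>
    if current_y < top then []
    else current_y :: pvLoopLegacyA spacing top k (current_y - spacing)

def compute_vertical_stack_positions_py (box : List (String × Int)) (item_size : Int) (spacing : Int) (item_count : Option Int) (source : String) : List Int :=
  let count : Int := max 0 (item_count.getD 0)   -- int(item_count or 0): None and 0 both give 0
  if count = 0 then []
  else
    let item_size := max 1 item_size
    let spacing := max 1 spacing
    if source == "box" then
      let current_bottom := PySem.Dict.getD (PySem.Dict.mk box) "y" 0
      pvLoopBoxA item_size spacing count.toNat current_bottom
    else
      let top := PySem.Dict.getD (PySem.Dict.mk box) "y" 0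
      let bottom := top + max 1 (PySem.Dict.getD (PySem.Dict.mk box) "height" item_size)
      pvLoopLegacyA spacing top count.toNat (bottom - item_size)

-- ===== PORT B =====
def compute_vertical_stack_positions_py_alt (box : List (String × Int)) (item_size : Int) (spacing : Int) (item_count : Option Int) (source : String) : List Int :=
  let count : Int := max 0 (item_count.getD 0)
  let item_size := max 1 item_size
  let spacing := max 1 spacing
  let sb : Int × Int :=
    if source == "box" then (PySem.Dict.getD (PySem.Dict.mk box) "y" 0 - item_size, 0)
    else
      let top := PySem.Dict.getD (PySem.Dict.mk box) "y" 0
      (top + max 1 (PySem.Dict.getD (PySem.Dict.mk box) "height" item_size) - item_size, top)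
  let start := sb.1
  let bound := sb.2
  let n : Int := if bound ≤ start then min count (PySem.Int.floordiv (start - bound) spacing + 1) else 0
  (List.range n.toNat).map (fun i : Nat => start - (i : Int) * spacing)

-- ===== PRECONDITION & SPEC =====
def Spec_compute_vertical_stack_positions_py (box : List (String × Int)) (item_size : Int) (spacing : Int) (item_count : Option Int) (source : String) (out : List Int) : Prop := out = compute_vertical_stack_positions_py_alt box item_size spacing item_count source
instance (box : List (String × Int)) (item_size : Int) (spacing : Int) (item_count : Option Int) (source : String) (out : List Int) : Decidable (Spec_compute_vertical_stack_positions_py box item_size spacing item_count source out) := by unfold Spec_compute_vertical_stack_positions_py; infer_instance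

-- ===== CLAIM (what is proved, stated in full; the proofs are below) =====
def Claim_equal_compute_vertical_stack_positions_py : Prop := ∀ (box : List (String × Int)) (item_size : Int) (spacing : Int) (item_count : Option Int) (source : String), Dom_compute_vertical_stack_positions_py box item_size spacing item_count source → Spec_compute_vertical_stack_positions_py box item_size spacing item_count source (compute_vertical_stack_positions_py box item_size spacing item_count source)

-- ===== LEMMAS AND PROOFS =====

-- the legacy loop is the arithmetic sequence of the first n valid positions
theorem pvLoopLegacyA_eq (spacing top : Int) (hsp : 1 ≤ spacing) :
    ∀ (k : Nat) (cur : Int),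
      pvLoopLegacyA spacing top k cur =
        (List.range (if top ≤ cur then min k (((cur - top).toNat / spacing.toNat) + 1) else 0)).map
          (fun i : Nat => cur - (i : Int) * spacing) := by
  intro k
  induction k with
  | zero =>
    intro cur
    rw [pvLoopLegacyA]
    split <;> simp
  | succ k ih =>
    intro cur
    by_cases h : cur < top
    · rw [pvLoopLegacyA, if_pos h, if_neg (not_le.mpr h)]
      simp
    · have h' : top ≤ cur := not_lt.mp h
      have hshift : ∀ (m : Nat),
          cur :: (List.range m).map (fun i : Nat => cur - spacing - (i : Int) * spacing) =
            (List.range (m + 1)).map (fun i : Nat => cur - (i : Int) * spacing) := by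
        intro m
        rw [List.range_succ_eq_map, List.map_cons, List.map_map]
        congr 1
        · ring
        · apply List.map_congr_left
          intro i _
          simp only [Function.comp_apply, Nat.succ_eq_add_one]
          push_cast
          ring
      rw [pvLoopLegacyA, if_neg h, ih (cur - spacing)]
      by_cases h2 : top ≤ cur - spacing
      · rw [if_pos h2, hshift, if_pos h']
        have hq : (cur - top).toNat / spacing.toNat =
            (cur - spacing - top).toNat / spacing.toNat + 1 := by
          have h1 : (cur - spacing - top).toNat = (cur - top).toNat - spacing.toNat := by omega
          rw [h1]
          exact Nat.div_eq_sub_div (by omega) (by omega)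
        have hn : min (k + 1) ((cur - top).toNat / spacing.toNat + 1) =
            min k ((cur - spacing - top).toNat / spacing.toNat + 1) + 1 := by
          rw [hq]
          obtain ⟨x, hx⟩ : ∃ x, (cur - spacing - top).toNat / spacing.toNat = x := ⟨_, rfl⟩
          rw [hx]
          omega
        rw [hn]
      · rw [if_neg h2, if_pos h']
        have hq : (cur - top).toNat / spacing.toNat = 0 := Nat.div_eq_of_lt (by omega)
        rw [hq]
        have hm : min (k + 1) (0 + 1) = 0 + 1 := by omega
        rw [hm, ← hshift 0]

-- the box loop is the legacy loop at bound 0, started at current_bottom - item_size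
theorem pvLoopBoxA_eq_legacy (item_size spacing : Int) :
    ∀ (k : Nat) (cb : Int),
      pvLoopBoxA item_size spacing k cb = pvLoopLegacyA spacing 0 k (cb - item_size) := by
  intro k
  induction k with
  | zero => intro cb; rfl
  | succ k ih =>
    intro cb
    rw [pvLoopBoxA, pvLoopLegacyA]
    by_cases h : cb - item_size < 0
    · rw [if_pos h, if_pos h]
    · rw [if_neg h, if_neg h, ih]
      congr 1
      ring_nf

-- B's integer count equals the Nat count used in the loop characterisation
theorem pv_count_eq (count start bound spacing : Int) (h0 : 0 ≤ count) (hsp : 1 ≤ spacing) :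
    (if bound ≤ start then min count (PySem.Int.floordiv (start - bound) spacing + 1) else 0).toNat =
      (if bound ≤ start then min count.toNat (((start - bound).toNat / spacing.toNat) + 1) else 0) := by
  by_cases h : bound ≤ start
  · rw [if_pos h, if_pos h]
    have key : (((start - bound).toNat / spacing.toNat : Nat) : Int) =
        PySem.Int.floordiv (start - bound) spacing := by
      rw [PySem.Int.floordiv_eq_ediv_of_pos (by omega), Int.natCast_div]
      congr 1 <;> omega
    rw [← key]
    obtain ⟨z, hz⟩ : ∃ z, (start - bound).toNat / spacing.toNat = z := ⟨_, rfl⟩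
    rw [hz]
    omega
  · rw [if_neg h, if_neg h]
    rfl

theorem pv_branch_eq (count start bound spacing : Int) (h0 : 0 ≤ count) (hsp : 1 ≤ spacing) :
    pvLoopLegacyA spacing bound count.toNat start =
      (List.range ((if bound ≤ start then min count (PySem.Int.floordiv (start - bound) spacing + 1) else 0)).toNat).map
        (fun i : Nat => start - (i : Int) * spacing) := by
  rw [pvLoopLegacyA_eq spacing bound hsp count.toNat start,
    pv_count_eq count start bound spacing h0 hsp]

-- B returns [] when the count is zero
theorem pv_zero_count (start bound spacing : Int) :
    (List.range ((if bound ≤ start then min 0 (PySem.Int.floordiv (start - bound) spacing + 1) else (0:Int))).toNat).map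
      (fun i : Nat => start - (i : Int) * spacing) = [] := by
  have h : (if bound ≤ start then min 0 (PySem.Int.floordiv (start - bound) spacing + 1) else (0:Int)).toNat = 0 := by
    split <;> omega
  rw [h]
  rfl

-- ===== VERDICT (by name: the statement is the Claim_ definition above) =====
theorem compute_vertical_stack_positions_py_spec : Claim_equal_compute_vertical_stack_positions_py := by
  intro box item_size spacing item_count source _
  show compute_vertical_stack_positions_py box item_size spacing item_count source
      = compute_vertical_stack_positions_py_alt box item_size spacing item_count source
  simp only [compute_vertical_stack_positions_py, compute_vertical_stack_positions_py_alt]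
  set count : Int := max 0 (item_count.getD 0) with hcount
  have h0 : 0 ≤ count := le_max_left 0 _
  have hsp1 : 1 ≤ max 1 spacing := le_max_left 1 _
  by_cases hb : source == "box"
  · rw [if_pos hb, if_pos hb]
    simp only []
    by_cases hc : count = 0
    · rw [if_pos hc, hc, pv_zero_count]
    · rw [if_neg hc, pvLoopBoxA_eq_legacy]
      exact pv_branch_eq count _ 0 _ h0 hsp1
  · rw [if_neg hb, if_neg hb]
    simp only []
    by_cases hc : count = 0
    · rw [if_pos hc, hc, pv_zero_count]
    · rw [if_neg hc]
      exact pv_branch_eq count _ _ _ h0 hsp1
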